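-- pv_equiv track=rewrite | github.com/erickfmm/ML-experiments | src/mlexperiments/deps/matrix_diagonally.py | diagonalOrder_indexes
-- ===== SOURCE A (Python) =====
-- def diagonalOrder_indexes(matrix):
--     ROW = len(matrix)
--     COL = len(matrix[0])
--     # There will be ROW+COL-1 lines in the output
--     for line in range(1, (ROW + COL)) :
--         indexes_line = []
--         # Get column index of the first element
--         # in this line of output. The index is 0
--         # for first ROW lines and line - ROW for
--         # remaining lines
--         start_col = max(0, line - ROW)
--
--         # Get count of elements in this line.
--         # The count of elements is equal to
--         # minimum of line number, COL-start_col and ROW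
--         count = min(line, (COL - start_col), ROW)
--
--         # Print elements of this line
--         for j in range(0, count) :
--             indexes_line.append( (min(ROW, line) - j - 1, start_col + j) )
--         yield indexes_line
-- ===== SOURCE B (Python) =====
-- def diagonalOrder_indexes(matrix):
--     ROW = len(matrix)
--     COL = len(matrix[0])
--     buckets = [[] for _ in range(ROW + COL - 1)]
--     # one scatter pass: descending i keeps each anti-diagonal bucket
--     # sorted by decreasing row, as required
--     for i in range(ROW - 1, -1, -1):
--         for j in range(COL):
--             buckets[i + j].append((i, j))
--     for bucket in buckets:
--         yield bucket
-- ===== Notes on version B (the rewrite author's own statement) =====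
-- stated objective: alternative
-- what changed: B replaces A's per-diagonal arithmetic (start_col/count recomputed for each output line) by a single scatter pass that drops every cell (i,j) into a pre-initialized bucket keyed by i+j, iterating i downward so each bucket is already in A's decreasing-row order, then yields the buckets.
import Mathlib
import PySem

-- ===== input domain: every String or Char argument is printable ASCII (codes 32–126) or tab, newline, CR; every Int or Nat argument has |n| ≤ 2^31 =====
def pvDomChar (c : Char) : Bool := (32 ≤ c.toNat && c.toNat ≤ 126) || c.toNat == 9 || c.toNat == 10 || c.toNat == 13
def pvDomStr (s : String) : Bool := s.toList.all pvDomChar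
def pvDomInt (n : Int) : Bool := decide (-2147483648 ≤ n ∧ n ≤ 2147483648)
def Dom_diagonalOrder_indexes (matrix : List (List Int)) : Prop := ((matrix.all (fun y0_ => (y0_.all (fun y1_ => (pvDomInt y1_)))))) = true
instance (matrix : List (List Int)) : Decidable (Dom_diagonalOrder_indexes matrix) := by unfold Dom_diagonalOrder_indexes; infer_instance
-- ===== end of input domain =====

-- B scatters every cell into an anti-diagonal bucket keyed by i+j in one pass
-- (descending row order) instead of recomputing start_col/count per diagonal;
-- equivalence of the yielded sequences is proved on non-empty matrices (A and B
-- both raise IndexError on []).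


-- ===== PORT A =====
def diagonalOrder_indexes (matrix : List (List Int)) : List (List (Int × Int)) :=
  let ROW : Int := matrix.length
  let COL : Int := (matrix.headD []).length   -- matrix[0]; Pre_ guarantees matrix ≠ []
  (PySem.List.pyRange 1 (ROW + COL) 1).map (fun line =>
    let start_col : Int := max 0 (line - ROW)
    let count : Int := min line (min (COL - start_col) ROW)
    (PySem.List.pyRange 0 count 1).map (fun j => (min ROW line - j - 1, start_col + j)))

-- ===== PORT B =====
def diagonalOrder_indexes_alt (matrix : List (List Int)) : List (List (Int × Int)) :=
  let ROW : Nat := matrix.length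
  let COL : Nat := (matrix.headD []).length   -- matrix[0]; Pre_ guarantees matrix ≠ []
  let buckets : List (List (Int × Int)) := List.replicate (ROW + COL - 1) []
  ((List.range ROW).reverse.foldl (fun bs i =>
    (List.range COL).foldl (fun bs j =>
      bs.modify (i + j) (fun b => b ++ [((i : Int), (j : Int))])) bs) buckets)

-- ===== PRECONDITION & SPEC =====
-- Pre_ excludes exactly the empty matrix, on which A raises IndexError at matrix[0].
def Pre_diagonalOrder_indexes (matrix : List (List Int)) : Prop := matrix ≠ []
instance (matrix : List (List Int)) : Decidable (Pre_diagonalOrder_indexes matrix) := by unfold Pre_diagonalOrder_indexes; infer_instance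
def pvWitness_diagonalOrder_indexes : List (List Int) := [[1, 2], [3, 4]]

def Spec_diagonalOrder_indexes (matrix : List (List Int)) (out : List (List (Int × Int))) : Prop := out = diagonalOrder_indexes_alt matrix
instance (matrix : List (List Int)) (out : List (List (Int × Int))) : Decidable (Spec_diagonalOrder_indexes matrix out) := by unfold Spec_diagonalOrder_indexes; infer_instance

-- ===== CLAIM (what is proved, stated in full; the proofs are below) =====
def Claim_equal_diagonalOrder_indexes : Prop := ∀ (matrix : List (List Int)), Dom_diagonalOrder_indexes matrix → Pre_diagonalOrder_indexes matrix → Spec_diagonalOrder_indexes matrix (diagonalOrder_indexes matrix)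

-- ===== LEMMAS AND PROOFS =====

-- the inner fold of B (one row scatter), viewed through getElem? at bucket d
lemma pv_row_fold_getElem? (i C d : Nat) (bs : List (List (Int × Int))) :
    (((List.range C).foldl (fun bs j =>
        bs.modify (i + j) (fun b => b ++ [((i : Int), (j : Int))])) bs)[d]?) =
    if i ≤ d ∧ d - i < C then
      bs[d]?.map (fun b => b ++ [((i : Int), ((d - i : Nat) : Int))])
    else bs[d]? := by
  induction C with
  | zero => simp
  | succ C ih =>
    rw [List.range_succ, List.foldl_append]
    simp only [List.foldl_cons, List.foldl_nil]
    rw [List.getElem?_modify]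
    by_cases hle : i ≤ d
    · by_cases hlt : d - i < C
      · have hne : i + C ≠ d := by omega
        rw [ih]
        simp [hle, hlt, hne, Nat.lt_succ_of_lt hlt]
      · by_cases heq : d - i = C
        · have he : i + C = d := by omega
          rw [ih]
          have h2 : d - i < C + 1 := by omega
          simp only [hlt, and_false, if_false, hle, h2, and_true, if_true, if_pos he]
          rw [heq]
          cases bs[d]? <;> simp
        · have hne : i + C ≠ d := by omega
          rw [ih]
          have h2 : ¬ (d - i < C + 1) := by omega
          simp [hlt, hne, h2]
    · have hne : i + C ≠ d := by omega
      rw [ih]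
      simp [hle, hne]

-- the outer fold of B, viewed through getElem? at bucket d
lemma pv_outer_fold_getElem? (C d : Nat) (is : List Nat) (bs : List (List (Int × Int))) :
    ((is.foldl (fun bs i =>
        (List.range C).foldl (fun bs j =>
          bs.modify (i + j) (fun b => b ++ [((i : Int), (j : Int))])) bs) bs)[d]?) =
    bs[d]?.map (fun b => b ++
      (is.filter (fun i => decide (i ≤ d ∧ d - i < C))).map
        (fun i => (((i : Nat) : Int), (((d - i : Nat) : Int))))) := by
  induction is generalizing bs with
  | nil =>
    cases hb : bs[d]? <;> simp [hb]
  | cons i is ih =>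
    simp only [List.foldl_cons, List.filter_cons]
    rw [ih, pv_row_fold_getElem?]
    by_cases hc : i ≤ d ∧ d - i < C
    · simp only [if_pos hc, decide_eq_true hc, Option.map_map]
      cases bs[d]? <;> simp
    · simp only [if_neg hc, decide_eq_false hc]
      cases bs[d]? <;> simp

lemma pv_filter_range_interval (R lo hi : Nat) :
    (List.range R).filter (fun i => decide (lo ≤ i ∧ i < hi)) =
    List.range' lo (min R hi - lo) := by
  induction R with
  | zero => simp
  | succ R ih =>
    rw [List.range_succ, List.filter_append, ih]
    by_cases hc : lo ≤ R ∧ R < hi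
    · have h1 : min (R + 1) hi - lo = (min R hi - lo) + 1 := by omega
      have h2 : lo + 1 * (min R hi - lo) = R := by omega
      rw [h1, List.range'_concat, h2]
      simp [hc]
    · have h1 : min (R + 1) hi - lo = min R hi - lo := by omega
      rw [h1]
      simp [hc]

lemma pv_per_diag (R C n : Nat) (hR : 1 ≤ R) :
    (PySem.List.pyRange 0
        (min ((1 : Int) + n) (min ((C : Int) - max 0 ((1 : Int) + n - R)) R)) 1).map
      (fun j => (min (R : Int) ((1 : Int) + n) - j - 1, max 0 ((1 : Int) + n - R) + j)) =
    ((List.range R).reverse.filter (fun i => decide (i ≤ n ∧ n - i < C))).map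
      (fun i => (((i : Nat) : Int), (((n - i : Nat) : Int)))) := by
  rw [List.filter_reverse]
  have hP : (fun i => decide (i ≤ n ∧ n - i < C)) =
      (fun i => decide (n + 1 - C ≤ i ∧ i < n + 1)) := by
    funext i; simp only [decide_eq_decide]; omega
  rw [hP, pv_filter_range_interval, PySem.List.pyRange_one]
  rw [List.map_map]
  apply List.ext_getElem
  · simp only [List.length_map, List.length_range, List.length_reverse, List.length_range']
    omega
  · intro k h1 h2
    simp only [List.length_map, List.length_range] at h1
    simp only [List.getElem_map, List.getElem_range, Function.comp_apply,
      List.getElem_reverse, List.length_range', List.getElem_range']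
    refine Prod.ext ?_ ?_ <;>
      simp only [List.length_map, List.length_reverse, List.length_range'] at h2 <;> omega

theorem pv_main (matrix : List (List Int)) (h : matrix ≠ []) :
    diagonalOrder_indexes matrix = diagonalOrder_indexes_alt matrix := by
  have hR : 1 ≤ matrix.length := by
    cases matrix with
    | nil => exact absurd rfl h
    | cons a l => simp
  simp only [diagonalOrder_indexes, diagonalOrder_indexes_alt]
  apply List.ext_getElem?
  intro n
  rw [pv_outer_fold_getElem?, PySem.List.pyRange_one]
  have hT : (((matrix.length : Int) + ((matrix.headD []).length : Int) - 1)).toNat =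
      matrix.length + (matrix.headD []).length - 1 := by omega
  by_cases hn : n < matrix.length + (matrix.headD []).length - 1
  · rw [List.getElem?_replicate, if_pos hn]
    rw [List.map_map, List.getElem?_map, List.getElem?_range (by omega : n < (((matrix.length : Int) + ((matrix.headD []).length : Int) - 1)).toNat)]
    simp only [Option.map_some, Function.comp_apply, List.nil_append, Option.some.injEq]
    have := pv_per_diag matrix.length (matrix.headD []).length n hR
    simpa using this
  · rw [List.getElem?_replicate, if_neg hn]
    rw [List.map_map, List.getElem?_eq_none
      (by simp only [List.length_map, List.length_range]; omega)]
    simp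

-- ===== VERDICT (by name: the statement is the Claim_ definition above) =====
theorem diagonalOrder_indexes_spec : Claim_equal_diagonalOrder_indexes := by
  intro m _ hpre
  exact pv_main m hpre
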